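-- pv_equiv track=rewrite | github.com/aengzu/codetree-TILs | 231208/함수를 이용한 온전수 판별/determining-the-whole-number-using-a-function.py | complete_number
-- ===== SOURCE A (Python) =====
-- def complete_number(a, b):
--     cnt = 0
--     for i in range(a, b+1):
--         if i%2==0:
--             continue
--         elif i%10==5:
--             continue
--         elif i%3==0 and i%9!=0:
--             continue
--
--         cnt += 1
--     return cnt
-- ===== SOURCE B (Python) =====
-- def complete_number(a, b):
--     # Count via the period-90 pattern of the divisibility tests: O(1) arithmetic.
--     valid = [r for r in range(90)
--              if r % 2 != 0 and r % 10 != 5 and not (r % 3 == 0 and r % 9 != 0)]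
--
--     def below(n):
--         q, r = divmod(n, 90)
--         return q * len(valid) + sum(1 for v in valid if v < r)
--
--     return below(b + 1) - below(a) if a <= b else 0
-- ===== Notes on version B (the rewrite author's own statement) =====
-- stated objective: faster
-- what changed: Replaced the per-integer scan over [a,b] by closed-form counting over the period-90 residue pattern of the tests (prefix-count function evaluated at the two endpoints).
import Mathlib
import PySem

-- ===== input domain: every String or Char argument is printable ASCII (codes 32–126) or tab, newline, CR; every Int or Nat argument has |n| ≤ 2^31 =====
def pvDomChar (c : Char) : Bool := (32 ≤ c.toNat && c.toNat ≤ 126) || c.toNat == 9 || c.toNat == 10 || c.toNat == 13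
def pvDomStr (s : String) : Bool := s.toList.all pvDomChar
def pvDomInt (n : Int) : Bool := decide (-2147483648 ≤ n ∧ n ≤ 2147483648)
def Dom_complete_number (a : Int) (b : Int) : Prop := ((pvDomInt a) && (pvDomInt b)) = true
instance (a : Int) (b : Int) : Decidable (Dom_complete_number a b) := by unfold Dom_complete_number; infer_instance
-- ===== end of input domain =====

-- B replaces A's per-integer scan of [a,b] by O(1) counting over the period-90 residue pattern (objective: faster).

-- ===== PORT A =====
def complete_number (a : Int) (b : Int) : Int :=
  (PySem.List.pyRange a (b + 1) 1).foldl (fun cnt i =>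
    if PySem.Int.mod i 2 == 0 then cnt
    else if PySem.Int.mod i 10 == 5 then cnt
    else if PySem.Int.mod i 3 == 0 && !(PySem.Int.mod i 9 == 0) then cnt
    else cnt + 1) 0

-- ===== PORT B =====
-- valid = [r for r in range(90) if …]
def pvValid : List Int :=
  (PySem.List.pyRange 0 90 1).filter (fun r =>
    !(PySem.Int.mod r 2 == 0) && !(PySem.Int.mod r 10 == 5) &&
    !(PySem.Int.mod r 3 == 0 && !(PySem.Int.mod r 9 == 0)))

-- below(n) = q*len(valid) + sum(1 for v in valid if v < r), (q,r) = divmod(n,90)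
def pvBelow (n : Int) : Int :=
  let q := PySem.Int.floordiv n 90
  let r := PySem.Int.mod n 90
  q * (pvValid.length : Int) + ((pvValid.filter (fun v => decide (v < r))).length : Int)

def complete_number_alt (a : Int) (b : Int) : Int :=
  if a ≤ b then pvBelow (b + 1) - pvBelow a else 0

-- ===== PRECONDITION & SPEC =====
def Spec_complete_number (a : Int) (b : Int) (out : Int) : Prop := out = complete_number_alt a b
instance (a : Int) (b : Int) (out : Int) : Decidable (Spec_complete_number a b out) := by unfold Spec_complete_number; infer_instance

-- ===== CLAIM (what is proved, stated in full; the proofs are below) =====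
def Claim_equal_complete_number : Prop := ∀ (a : Int) (b : Int), Dom_complete_number a b → Spec_complete_number a b (complete_number a b)

-- ===== LEMMAS AND PROOFS =====

-- the per-element test, as a single Bool (the body of A's loop keeps cnt iff this is false)
def pvQ (i : Int) : Bool :=
  !(PySem.Int.mod i 2 == 0) && !(PySem.Int.mod i 10 == 5) &&
  !(PySem.Int.mod i 3 == 0 && !(PySem.Int.mod i 9 == 0))

lemma pvFoldl_eq (l : List Int) (c : Int) :
    l.foldl (fun cnt i =>
      if PySem.Int.mod i 2 == 0 then cnt
      else if PySem.Int.mod i 10 == 5 then cnt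
      else if PySem.Int.mod i 3 == 0 && !(PySem.Int.mod i 9 == 0) then cnt
      else cnt + 1) c = c + (l.countP pvQ : Int) := by
  induction l generalizing c with
  | nil => simp
  | cons x xs ih =>
    rw [List.foldl_cons, List.countP_cons]
    cases h1 : (PySem.Int.mod x 2 == 0) <;>
    cases h2 : (PySem.Int.mod x 10 == 5) <;>
    cases h3 : (PySem.Int.mod x 3 == 0 && !(PySem.Int.mod x 9 == 0)) <;>
      simp only [pvQ, h1, h2, h3, Bool.not_true, Bool.not_false,
        Bool.and_true, Bool.and_false, if_true, if_false, ih] <;>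
      push_cast <;> ring

-- pvQ depends only on the residue mod 90
lemma pvQ_emod (i : Int) : pvQ i = pvQ (i % 90) := by
  have h2 : i % 90 % 2 = i % 2 := Int.emod_emod_of_dvd i (by norm_num)
  have h10 : i % 90 % 10 = i % 10 := Int.emod_emod_of_dvd i (by norm_num)
  have h3 : i % 90 % 3 = i % 3 := Int.emod_emod_of_dvd i (by norm_num)
  have h9 : i % 90 % 9 = i % 9 := Int.emod_emod_of_dvd i (by norm_num)
  simp [pvQ, PySem.Int.mod_eq_emod_of_pos (show (0:Int) < 2 by norm_num),
    PySem.Int.mod_eq_emod_of_pos (show (0:Int) < 10 by norm_num),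
    PySem.Int.mod_eq_emod_of_pos (show (0:Int) < 3 by norm_num),
    PySem.Int.mod_eq_emod_of_pos (show (0:Int) < 9 by norm_num), h2, h10, h3, h9]

-- totals over one full period, checked by computation
lemma pvResid (k : Fin 90) :
    ((pvValid.filter (fun v => decide (v < (k : Int) + 1))).length : Int)
      = ((pvValid.filter (fun v => decide (v < (k : Int)))).length : Int)
        + (if pvQ (k : Int) then 1 else 0) := by
  fin_cases k <;> decide

lemma pvG0 : ((pvValid.filter (fun v => decide (v < (0 : Int)))).length : Int) = 0 := by decide

lemma pvLfull : (pvValid.length : Int)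
    = ((pvValid.filter (fun v => decide (v < (89 : Int)))).length : Int)
      + (if pvQ (89 : Int) then 1 else 0) := by decide

-- one step of the prefix counter
lemma pvBelow_step (i : Int) : pvBelow (i + 1) = pvBelow i + (if pvQ i then 1 else 0) := by
  have hq1 : PySem.Int.floordiv (i + 1) 90 = (i + 1) / 90 :=
    PySem.Int.floordiv_eq_ediv_of_pos (show (0:Int) < 90 by norm_num)
  have hq0 : PySem.Int.floordiv i 90 = i / 90 :=
    PySem.Int.floordiv_eq_ediv_of_pos (show (0:Int) < 90 by norm_num)
  have hr1 : PySem.Int.mod (i + 1) 90 = (i + 1) % 90 :=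
    PySem.Int.mod_eq_emod_of_pos (show (0:Int) < 90 by norm_num)
  have hr0 : PySem.Int.mod i 90 = i % 90 :=
    PySem.Int.mod_eq_emod_of_pos (show (0:Int) < 90 by norm_num)
  have hrange : 0 ≤ i % 90 ∧ i % 90 < 90 := ⟨Int.emod_nonneg i (by norm_num), Int.emod_lt_of_pos i (by norm_num)⟩
  rw [pvQ_emod i]
  by_cases h89 : i % 90 = 89
  · have hq : (i + 1) / 90 = i / 90 + 1 := by omega
    have hr : (i + 1) % 90 = 0 := by omega
    simp only [pvBelow, hq1, hq0, hr1, hr0, hq, hr, h89, pvG0]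
    have := pvLfull
    ring_nf
    ring_nf at this
    omega
  · have hq : (i + 1) / 90 = i / 90 := by omega
    have hr : (i + 1) % 90 = i % 90 + 1 := by omega
    simp only [pvBelow, hq1, hq0, hr1, hr0, hq, hr]
    have hk : (i % 90).toNat < 90 := by omega
    have := pvResid ⟨(i % 90).toNat, hk⟩
    have hcast : ((i % 90).toNat : Int) = i % 90 := Int.toNat_of_nonneg hrange.1
    rw [hcast] at this
    omega

-- prefix counter counts pvQ over any range
lemma pvBelow_count (k : Nat) (a : Int) :
    pvBelow (a + k) = pvBelow a + ((PySem.List.pyRange a (a + k) 1).countP pvQ : Int) := by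
  induction k with
  | zero => simp [PySem.List.pyRange_one_eq_nil (le_refl a)]
  | succ n ih =>
    have hcast : (a : Int) + ((n + 1 : Nat) : Int) = a + n + 1 := by push_cast; ring
    rw [hcast, pvBelow_step (a + n), ih,
      PySem.List.pyRange_one_succ_right (show a ≤ a + n by omega), List.countP_append]
    simp [List.countP_cons]
    by_cases h : pvQ (a + n) <;> simp [h] <;> push_cast <;> ring

-- ===== VERDICT (by name: the statement is the Claim_ definition above) =====
theorem complete_number_spec : Claim_equal_complete_number := by
  intro a b _
  unfold Spec_complete_number complete_number complete_number_alt
  by_cases hab : a ≤ b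
  · rw [pvFoldl_eq, if_pos hab]
    have hk : (b + 1 : Int) = a + ((b + 1 - a).toNat : Nat) := by
      have : ((b + 1 - a).toNat : Int) = b + 1 - a := Int.toNat_of_nonneg (by omega)
      omega
    have := pvBelow_count (b + 1 - a).toNat a
    rw [← hk] at this
    omega
  · rw [if_neg hab, PySem.List.pyRange_one_eq_nil (by omega)]
    simp
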